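-- pv_equiv track=rewrite | github.com/RM25BAM/Computer-Security-CMPT-367 | Homework/Homework_1/Q1.py | product_Cipher
-- ===== SOURCE A (Python) =====
-- def product_Cipher(user_input, shift, key):
--     #apply both sequentially that is the product cipher
--     user_input = user_input.upper()
--     user_input = user_input.replace(' ', '').replace("'", "").replace(".", "").replace(",", "")
--     ans = ''
--     for i in user_input:
--         formula = ((ord(i) - 65 + shift) % 26) + 65
--         ans += chr(formula)
--     final = ''
--     key_index = 0
--     for i in ans:
--         formula = ((ord(i) - 65 + key[key_index % len(key)]) % 26) + 65
--         final += chr(formula)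
--         key_index += 1
--     return final
-- ===== SOURCE B (Python) =====
-- def product_Cipher(user_input, shift, key):
--     s = user_input.upper().replace(' ', '').replace("'", "").replace(".", "").replace(",", "")
--     n = len(key)
--     return ''.join(chr((ord(c) - 65 + shift + key[i % n]) % 26 + 65) for i, c in enumerate(s))
-- ===== Notes on version B (the rewrite author's own statement) =====
-- stated objective: simpler
-- what changed: B fuses A's two sequential substitution passes (Caesar over the whole string, then Vigenere over the intermediate string) into a single indexed pass that applies the combined offset (x + shift + key[i % n]) % 26 directly, eliminating the intermediate string; the catenation loop becomes a join over a generator.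
import Mathlib
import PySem

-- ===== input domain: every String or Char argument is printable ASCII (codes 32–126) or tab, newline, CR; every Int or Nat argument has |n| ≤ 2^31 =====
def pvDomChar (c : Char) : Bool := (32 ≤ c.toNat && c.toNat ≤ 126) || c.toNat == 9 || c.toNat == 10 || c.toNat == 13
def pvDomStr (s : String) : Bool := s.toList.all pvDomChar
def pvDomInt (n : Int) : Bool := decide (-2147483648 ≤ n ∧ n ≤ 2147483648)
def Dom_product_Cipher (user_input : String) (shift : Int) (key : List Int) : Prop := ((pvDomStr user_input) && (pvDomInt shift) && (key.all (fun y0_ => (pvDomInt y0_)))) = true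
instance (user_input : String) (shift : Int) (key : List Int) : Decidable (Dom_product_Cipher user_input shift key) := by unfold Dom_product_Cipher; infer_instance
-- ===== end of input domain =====

-- B fuses A's two sequential substitution loops into one indexed pass, computing the
-- combined Caesar+Vigenère offset (x + shift + key[i % n]) % 26 directly (objective: simpler).

-- ===== PORT A =====
def product_Cipher (user_input : String) (shift : Int) (key : List Int) : String :=
  let u := PySem.Str.replace (PySem.Str.replace (PySem.Str.replace (PySem.Str.replace
             (PySem.Str.upper user_input) " " "") "'" "") "." "") "," ""
  let ans : List Char := u.toList.foldl (fun acc c =>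
    acc ++ [Char.ofNat ((PySem.Int.mod ((c.toNat : Int) - 65 + shift) 26 + 65).toNat)]) []
  -- second loop: accumulator carries (final, key_index); key[key_index % len(key)] is in
  -- range whenever key ≠ [] (Pre_ excludes the empty-key ZeroDivisionError case)
  let fin := ans.foldl (fun (st : List Char × Int) c =>
    (st.1 ++ [Char.ofNat ((PySem.Int.mod ((c.toNat : Int) - 65 +
        PySem.List.pyGetD key (PySem.Int.mod st.2 (key.length : Int)) 0) 26 + 65).toNat)],
     st.2 + 1)) (([] : List Char), (0 : Int))
  String.ofList fin.1

-- ===== PORT B =====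
def product_Cipher_alt (user_input : String) (shift : Int) (key : List Int) : String :=
  let s := PySem.Str.replace (PySem.Str.replace (PySem.Str.replace (PySem.Str.replace
             (PySem.Str.upper user_input) " " "") "'" "") "." "") "," ""
  let n : Int := (key.length : Int)
  String.ofList ((PySem.List.enumerate s.toList).map (fun p =>
    Char.ofNat ((PySem.Int.mod ((p.2.toNat : Int) - 65 + shift +
        PySem.List.pyGetD key (PySem.Int.mod p.1 n) 0) 26 + 65).toNat)))

-- ===== PRECONDITION & SPEC =====
-- Pre_ excludes exactly the inputs on which A raises ZeroDivisionError (key == [] while the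
-- cleaned input is non-empty); B raises there too.
def Pre_product_Cipher (user_input : String) (shift : Int) (key : List Int) : Prop :=
  key ≠ [] ∨ (PySem.Str.replace (PySem.Str.replace (PySem.Str.replace (PySem.Str.replace
    (PySem.Str.upper user_input) " " "") "'" "") "." "") "," "").toList = []
instance (user_input : String) (shift : Int) (key : List Int) : Decidable (Pre_product_Cipher user_input shift key) := by unfold Pre_product_Cipher; infer_instance

def pvWitness_product_Cipher : String × Int × List Int := ("Hello, World.", 3, [1, 2])

def Spec_product_Cipher (user_input : String) (shift : Int) (key : List Int) (out : String) : Prop := out = product_Cipher_alt user_input shift key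
instance (user_input : String) (shift : Int) (key : List Int) (out : String) : Decidable (Spec_product_Cipher user_input shift key out) := by unfold Spec_product_Cipher; infer_instance

-- ===== CLAIM (what is proved, stated in full; the proofs are below) =====
def Claim_equal_product_Cipher : Prop := ∀ (user_input : String) (shift : Int) (key : List Int), Dom_product_Cipher user_input shift key → Pre_product_Cipher user_input shift key → Spec_product_Cipher user_input shift key (product_Cipher user_input shift key)

-- ===== LEMMAS AND PROOFS =====

-- Char.toNat ∘ Char.ofNat is the identity below the surrogate range
theorem pv_toNat_ofNat (m : Nat) (h : m < 55296) : Char.toNat (Char.ofNat m) = m := by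
  unfold Char.ofNat Char.toNat
  split
  · rfl
  · rename_i hn; exact absurd (Or.inl h) hn

-- A's second loop, characterised: it maps the keyed substitution over the enumerated list
theorem pv_foldl2 (key : List Int) (l : List Char) (acc : List Char) (k : Int) :
    (l.foldl (fun (st : List Char × Int) c =>
      (st.1 ++ [Char.ofNat ((PySem.Int.mod ((c.toNat : Int) - 65 +
          PySem.List.pyGetD key (PySem.Int.mod st.2 (key.length : Int)) 0) 26 + 65).toNat)],
       st.2 + 1)) (acc, k)).1
    = acc ++ (PySem.List.enumerate l k).map (fun p =>
        Char.ofNat ((PySem.Int.mod ((p.2.toNat : Int) - 65 +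
          PySem.List.pyGetD key (PySem.Int.mod p.1 (key.length : Int)) 0) 26 + 65).toNat)) := by
  induction l generalizing acc k with
  | nil => simp [PySem.List.enumerate_nil]
  | cons c t ih =>
    simp only [List.foldl_cons, PySem.List.enumerate_cons, List.map_cons]
    rw [ih]
    simp

-- enumerate commutes with map on the elements
theorem pv_enumerate_map (f : Char → Char) (l : List Char) (k : Int) :
    PySem.List.enumerate (l.map f) k
      = (PySem.List.enumerate l k).map (fun p => (p.1, f p.2)) := by
  induction l generalizing k with
  | nil => simp [PySem.List.enumerate_nil]
  | cons c t ih => simp [PySem.List.enumerate_cons, ih]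

-- the per-character algebra: Caesar then Vigenère is the fused offset
theorem pv_fuse (x shift kk : Int) :
    PySem.Int.mod (((PySem.Int.mod (x + shift) 26 + 65).toNat : Int) - 65 + kk) 26
      = PySem.Int.mod (x + shift + kk) 26 := by
  have h26 : (0 : Int) < 26 := by norm_num
  have hnn : 0 ≤ PySem.Int.mod (x + shift) 26 := PySem.Int.mod_nonneg _ h26
  have hcast : (((PySem.Int.mod (x + shift) 26 + 65).toNat : Int)) = PySem.Int.mod (x + shift) 26 + 65 :=
    Int.toNat_of_nonneg (by omega)
  rw [hcast]
  simp only [PySem.Int.mod_eq_emod_of_pos h26]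
  have : (x + shift) % 26 + 65 - 65 + kk = (x + shift) % 26 + kk := by ring
  rw [this, Int.emod_add_emod]

-- the Caesar output code point is an uppercase letter, hence a valid Char
theorem pv_caesar_lt (x shift : Int) :
    (PySem.Int.mod (x + shift) 26 + 65).toNat < 55296 := by
  have h26 : (0 : Int) < 26 := by norm_num
  have h1 := PySem.Int.mod_nonneg (x + shift) h26
  have h2 := PySem.Int.mod_lt (x + shift) h26
  omega

-- per-element form of the fused pass, on enumerated pairs
theorem pv_point (shift : Int) (key : List Int) (p : Int × Char) :
    Char.ofNat ((PySem.Int.mod (((Char.ofNat ((PySem.Int.mod ((p.2.toNat : Int) - 65 + shift) 26 + 65).toNat)).toNat : Int) - 65 +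
        PySem.List.pyGetD key (PySem.Int.mod p.1 (key.length : Int)) 0) 26 + 65).toNat)
    = Char.ofNat ((PySem.Int.mod ((p.2.toNat : Int) - 65 + shift +
        PySem.List.pyGetD key (PySem.Int.mod p.1 (key.length : Int)) 0) 26 + 65).toNat) := by
  rw [pv_toNat_ofNat _ (pv_caesar_lt ((p.2.toNat : Int) - 65) shift),
      pv_fuse ((p.2.toNat : Int) - 65) shift _]

-- ===== VERDICT (by name: the statement is the Claim_ definition above) =====
set_option maxHeartbeats 1000000 in
theorem product_Cipher_spec : Claim_equal_product_Cipher := by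
  intro user_input shift key _ _
  unfold Spec_product_Cipher product_Cipher product_Cipher_alt
  simp only []
  rw [PySem.List.foldl_append_singleton_eq_map, pv_foldl2]
  simp only [List.nil_append]
  rw [pv_enumerate_map]
  simp only [List.map_map]
  refine congrArg String.ofList (List.map_congr_left ?_)
  intro p _
  exact pv_point shift key p
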